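-- pv_equiv track=rewrite | github.com/hemalathanaredlaMAHI/CP-elective-4 | 04-recursion_powersof3ton-Python/recursion_powersof3ton.py | powerof3ton
-- ===== SOURCE A (Python) =====
-- def powerof3ton(n,i,l):
-- 	if(3**i>n):
-- 		return l
-- 	else:
-- 		r=3**i
-- 		i+=1
-- 		l.append(r)
-- 		return powerof3ton(n,i,l)
-- ===== SOURCE B (Python) =====
-- def powerof3ton(n, i, l):
--     # two-phase: first find the first exponent j >= i with 3**j > n,
--     # then extend l with all powers 3**k for k in [i, j) in one go
--     j = i
--     while 3 ** j <= n:
--         j += 1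
--     l.extend(3 ** k for k in range(i, j))
--     return l
-- ===== Notes on version B (the rewrite author's own statement) =====
-- stated objective: alternative
-- what changed: Replaced the tail-recursive append-one-power-per-call with a two-phase loop: first find the end exponent j with 3**j > n, then extend l with all powers over range(i, j) in one pass.
-- outside the precondition, e.g. on powerof3ton(5, -1, []): A returns [0.3333333333333333, 1, 3], B returns [0.3333333333333333, 1, 3]; on powerof3ton(0, -2, []): A returns [], B returns []
import Mathlib
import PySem

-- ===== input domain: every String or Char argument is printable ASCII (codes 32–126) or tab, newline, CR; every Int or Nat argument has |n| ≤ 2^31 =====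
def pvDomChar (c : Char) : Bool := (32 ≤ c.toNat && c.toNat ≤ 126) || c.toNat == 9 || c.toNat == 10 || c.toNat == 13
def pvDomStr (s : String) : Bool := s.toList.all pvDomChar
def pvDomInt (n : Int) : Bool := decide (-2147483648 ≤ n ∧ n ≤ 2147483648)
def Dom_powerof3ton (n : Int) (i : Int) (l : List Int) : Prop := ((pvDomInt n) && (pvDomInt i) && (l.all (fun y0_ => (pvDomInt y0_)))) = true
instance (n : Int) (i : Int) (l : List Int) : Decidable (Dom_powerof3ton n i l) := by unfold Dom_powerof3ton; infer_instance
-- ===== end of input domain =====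

-- B replaces A's tail recursion (append one power per call) by a two-phase decomposition:
-- find the end exponent first, then append all powers over that range in one pass (objective: alternative).


-- shared helpers: Python's '3**i > n' test against an int n (for i < 0 the float 3**i lies in (0,1),
-- so the comparison holds iff n < 1); and the value 3**i (integral only for i ≥ 0; i < 0 is outside Pre_)
def pyPow3Gt (i n : Int) : Bool := if i < 0 then decide (n < 1) else decide (n < 3 ^ i.toNat)
def pyPow3 (i : Int) : Int := if i < 0 then 0 else 3 ^ i.toNat

theorem pow3Gt_false_le (i n : Int) (h : pyPow3Gt i n = false) : i ≤ n := by
  unfold pyPow3Gt at h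
  split at h
  · simp at h; omega
  · simp at h
    have h2 : (i.toNat : Int) < (3 : Int) ^ i.toNat := by
      exact_mod_cast Nat.lt_pow_self (a := 3) (n := i.toNat) (h := by norm_num)
    omega

-- ===== PORT A =====
def powerof3ton (n : Int) (i : Int) (l : List Int) : List Int :=
  if pyPow3Gt i n then l
  else
    let r := pyPow3 i
    powerof3ton n (i + 1) (l ++ [r])
termination_by (n + 1 - i).toNat
decreasing_by
  rename_i h
  have := pow3Gt_false_le i n (by simpa using h)
  omega

-- ===== PORT B =====
def findEnd3 (n : Int) (j : Int) : Int :=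
  if pyPow3Gt j n then j else findEnd3 n (j + 1)
termination_by (n + 1 - j).toNat
decreasing_by
  rename_i h
  have := pow3Gt_false_le j n (by simpa using h)
  omega

def powerof3ton_alt (n : Int) (i : Int) (l : List Int) : List Int :=
  l ++ (PySem.List.pyRange i (findEnd3 n i) 1).map pyPow3

-- ===== PRECONDITION & SPEC =====
-- Pre_ excludes i < 0 with n ≥ 0: there Python's 3**i is a float (which can even underflow to 0.0
-- when i is very negative and n = 0), so A's result can contain non-integer floats — not a value of
-- the declared type List Int (B returns the same values there); for n < 0 the float is always > n
-- and A returns l at once.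
def Pre_powerof3ton (n : Int) (i : Int) (l : List Int) : Prop := 0 ≤ i ∨ n < 0
instance (n : Int) (i : Int) (l : List Int) : Decidable (Pre_powerof3ton n i l) := by unfold Pre_powerof3ton; infer_instance
def pvWitness_powerof3ton : Int × Int × List Int := (10, 0, [7])

def Spec_powerof3ton (n : Int) (i : Int) (l : List Int) (out : List Int) : Prop := out = powerof3ton_alt n i l
instance (n : Int) (i : Int) (l : List Int) (out : List Int) : Decidable (Spec_powerof3ton n i l out) := by unfold Spec_powerof3ton; infer_instance

-- ===== CLAIM (what is proved, stated in full; the proofs are below) =====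
def Claim_equal_powerof3ton : Prop := ∀ (n : Int) (i : Int) (l : List Int), Dom_powerof3ton n i l → Pre_powerof3ton n i l → Spec_powerof3ton n i l (powerof3ton n i l)

-- ===== LEMMAS AND PROOFS =====
theorem le_findEnd3 (n j : Int) : j ≤ findEnd3 n j := by
  unfold findEnd3
  split
  · exact le_refl j
  · have := le_findEnd3 n (j + 1)
    omega
termination_by (n + 1 - j).toNat
decreasing_by
  rename_i h
  have := pow3Gt_false_le j n (by simpa using h)
  omega

theorem findEnd3_step (n j : Int) (h : pyPow3Gt j n = false) :
    findEnd3 n j = findEnd3 n (j + 1) := by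
  conv_lhs => rw [findEnd3]
  simp [h]

theorem powerof3ton_eq (n i : Int) (l : List Int) :
    powerof3ton n i l = l ++ (PySem.List.pyRange i (findEnd3 n i) 1).map pyPow3 := by
  unfold powerof3ton
  split
  · rename_i h
    have : findEnd3 n i = i := by unfold findEnd3; simp [h]
    simp [this, PySem.List.pyRange_one_eq_nil (le_refl i)]
  · rename_i h
    simp only [Bool.not_eq_true] at h
    rw [powerof3ton_eq n (i + 1) (l ++ [pyPow3 i])]
    have hlt : i < findEnd3 n i := by
      rw [findEnd3_step n i h]
      have := le_findEnd3 n (i + 1); omega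
    rw [PySem.List.pyRange_one_cons hlt, findEnd3_step n i h]
    simp
termination_by (n + 1 - i).toNat
decreasing_by
  rename_i h
  have := pow3Gt_false_le i n (by simpa using h)
  omega

-- ===== VERDICT (by name: the statement is the Claim_ definition above) =====
theorem powerof3ton_spec : Claim_equal_powerof3ton := by
  intro n i l _ _
  unfold Spec_powerof3ton powerof3ton_alt
  exact powerof3ton_eq n i l
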